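-- pv_equiv track=rewrite | github.com/RxndyOG/BachelorsThesisStateAbstractionStefanWerner | Bachelor/MatrixOperation.py | state_edge
-- ===== SOURCE A (Python) =====
-- def state_edge(state):
--
--     edged_state = state.copy()
--
--     for i in edged_state:
--         for j in range(len(i)):
--             if j > 0:
--                 if (i[j] == 0 and i[j-1] != 0 and i[j-1] != 1):
--                     i[j] = 1
--             if j < len(i) - 1:
--                 if (i[j] == 0 and i[j+1] != 0 and i[j+1] != 1):
--                     i[j] = 1
--
--     for j in range(len(edged_state[0])):
--         for i in range(len(edged_state)):
--             if i > 0: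
--                 if (edged_state[i][j] == 0 and edged_state[i-1][j] != 0 and edged_state[i-1][j] != 1):
--                     edged_state[i][j] = 1
--             if i < len(edged_state) - 1:
--                 if (edged_state[i][j] == 0 and edged_state[i+1][j] != 0 and edged_state[i+1][j] != 1):
--                     edged_state[i][j] = 1
--
--     for i in edged_state:
--         for j in range(len(i)):
--             if i[j] == 1:
--                 i[j] = 2
--
--     for j in range(len(edged_state[0])):
--         for i in range(len(edged_state)):
--             if edged_state[i][j] == 1:
--                 edged_state[i][j] = 2
--
--     return edged_state
-- ===== SOURCE B (Python) =====
-- def state_edge(state):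
--     # One edge rule for a line, applied to every row and (via zip-transpose) to
--     # every column; then a single write pass. Mutates the rows in place like a
--     # caller of the original would observe.
--     edged_state = state.copy()
--
--     def wall(v):
--         return v != 0 and v != 1
--
--     def edge_indices(line):
--         return [j for j, v in enumerate(line) if v == 0 and (
--             (j > 0 and wall(line[j - 1])) or
--             (j + 1 < len(line) and wall(line[j + 1])))]
--
--     row_marks = [edge_indices(row) for row in edged_state]
--     col_marks = [edge_indices(list(col)) for col in zip(*edged_state)]
--
--     for i, row in enumerate(edged_state):
--         for j in range(len(row)):
--             if row[j] == 1 or j in row_marks[i] or \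
--                     (j < len(col_marks) and i in col_marks[j]):
--                 row[j] = 2
--     return edged_state
-- ===== Notes on version B (the rewrite author's own statement) =====
-- stated objective: alternative
-- what changed: Replaces A's four sequential in-place sweeps (horizontal marking, vertical marking over the live partially-updated grid, then two 1-to-2 rewrite passes) by one 1-D edge rule applied to every row and, via zip-transpose, to every column, followed by a single write pass; Pre_ excludes only the inputs where A raises IndexError (empty grid or a row shorter than row 0).
import Mathlib
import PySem

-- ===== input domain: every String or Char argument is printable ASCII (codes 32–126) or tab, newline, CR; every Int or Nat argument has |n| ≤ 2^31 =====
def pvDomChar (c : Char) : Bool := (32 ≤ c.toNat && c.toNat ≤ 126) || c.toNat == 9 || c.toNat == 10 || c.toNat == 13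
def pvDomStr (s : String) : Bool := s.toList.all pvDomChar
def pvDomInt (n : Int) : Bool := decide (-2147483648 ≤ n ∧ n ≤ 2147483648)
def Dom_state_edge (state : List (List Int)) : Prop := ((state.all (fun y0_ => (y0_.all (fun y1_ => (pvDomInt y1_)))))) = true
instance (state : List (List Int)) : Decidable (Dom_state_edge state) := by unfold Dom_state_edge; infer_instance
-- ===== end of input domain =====

-- B replaces A's four mutating sweeps by one snapshot-driven pass; equivalence is about the
-- returned grid (both A and B mutate the caller's row objects in place the same way).

-- ===== PORT A =====
-- Python list indexing r[j] here is always in range in A's loops; getD is exact there.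
def pvGetI (r : List Int) (j : Nat) : Int := r.getD j 0

def pvGet2 (g : List (List Int)) (i j : Nat) : Int := (g.getD i []).getD j 0

def pvSet2 (g : List (List Int)) (i j : Nat) (v : Int) : List (List Int) :=
  g.set i ((g.getD i []).set j v)

-- first `if` of A's horizontal loop body
def pvHStep1 (r : List Int) (j : Nat) : List Int :=
  if 0 < j ∧ pvGetI r j = 0 ∧ pvGetI r (j-1) ≠ 0 ∧ pvGetI r (j-1) ≠ 1 then r.set j 1 else r

-- whole body of A's horizontal loop for index j (second `if` reads the updated row)
def pvHStep (r : List Int) (j : Nat) : List Int :=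
  if j + 1 < (pvHStep1 r j).length ∧ pvGetI (pvHStep1 r j) j = 0 ∧
      pvGetI (pvHStep1 r j) (j+1) ≠ 0 ∧ pvGetI (pvHStep1 r j) (j+1) ≠ 1 then
    (pvHStep1 r j).set j 1
  else pvHStep1 r j

-- A's first sweep: per row, left-to-right
def pvHPass (r : List Int) : List Int := (List.range r.length).foldl pvHStep r

def pvVStep1 (g : List (List Int)) (j i : Nat) : List (List Int) :=
  if 0 < i ∧ pvGet2 g i j = 0 ∧ pvGet2 g (i-1) j ≠ 0 ∧ pvGet2 g (i-1) j ≠ 1 then pvSet2 g i j 1 else g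

def pvVStep (g : List (List Int)) (j i : Nat) : List (List Int) :=
  if i + 1 < (pvVStep1 g j i).length ∧ pvGet2 (pvVStep1 g j i) i j = 0 ∧
      pvGet2 (pvVStep1 g j i) (i+1) j ≠ 0 ∧ pvGet2 (pvVStep1 g j i) (i+1) j ≠ 1 then
    pvSet2 (pvVStep1 g j i) i j 1
  else pvVStep1 g j i

-- A's second sweep: per column j < len(grid[0]), top-to-bottom
def pvVPass (g : List (List Int)) : List (List Int) :=
  (List.range (g.headD []).length).foldl
    (fun h j => (List.range h.length).foldl (fun h' i => pvVStep h' j i) h) g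

-- A's third sweep: every 1 becomes 2
def pvMark2 (g : List (List Int)) : List (List Int) :=
  g.map (fun r => r.map (fun v => if v = 1 then (2 : Int) else v))

def pvFStep (g : List (List Int)) (j i : Nat) : List (List Int) :=
  if pvGet2 g i j = 1 then pvSet2 g i j 2 else g

-- A's fourth sweep (column-wise 1 → 2)
def pvFPass (g : List (List Int)) : List (List Int) :=
  (List.range (g.headD []).length).foldl
    (fun h j => (List.range h.length).foldl (fun h' i => pvFStep h' j i) h) g

def state_edge (state : List (List Int)) : List (List Int) :=
  pvFPass (pvMark2 (pvVPass (state.map pvHPass)))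

-- ===== PORT B =====
def pvWall (v : Int) : Bool := v != 0 && v != 1

-- indices of line that hold a 0 next to a wall value; line[j±1] is in range where read (getD exact)
def pvEdgeIdx (line : List Int) : List Nat :=
  line.zipIdx.filterMap fun p =>
    if p.1 = 0 ∧ ((0 < p.2 ∧ pvWall (line.getD (p.2-1) 0) = true) ∨
        (p.2 + 1 < line.length ∧ pvWall (line.getD (p.2+1) 0) = true)) then some p.2 else none

-- Python's zip(*g): the columns of g, truncated at the shortest row
def pvCols (g : List (List Int)) : Nat := ((g.map List.length).min?).getD 0

def pvZipT (g : List (List Int)) : List (List Int) :=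
  (List.range (pvCols g)).map fun j => g.map fun r => r.getD j 0

def state_edge_alt (state : List (List Int)) : List (List Int) :=
  let rowMarks := state.map pvEdgeIdx
  let colMarks := (pvZipT state).map pvEdgeIdx
  state.mapIdx fun i row => row.mapIdx fun j v =>
    if v = 1 ∨ (rowMarks.getD i []).contains j ∨
        (j < colMarks.length ∧ (colMarks.getD j []).contains i) then 2 else v

-- ===== PRECONDITION & SPEC =====
-- Pre_ excludes exactly the inputs on which A raises IndexError: the empty grid
-- (edged_state[0]) and grids where some row is shorter than row 0 (edged_state[i][j]
-- in the column sweep); A returns normally on every other list of lists of ints.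
def Pre_state_edge (state : List (List Int)) : Prop :=
  state ≠ [] ∧ ∀ r ∈ state, (state.headD []).length ≤ r.length

instance (state : List (List Int)) : Decidable (Pre_state_edge state) := by
  unfold Pre_state_edge; infer_instance

def pvWitness_state_edge : List (List Int) := [[0, 2], [0, 0]]

def Spec_state_edge (state : List (List Int)) (out : List (List Int)) : Prop := out = state_edge_alt state
instance (state : List (List Int)) (out : List (List Int)) : Decidable (Spec_state_edge state out) := by unfold Spec_state_edge; infer_instance

-- ===== CLAIM (what is proved, stated in full; the proofs are below) =====
def Claim_equal_state_edge : Prop := ∀ (state : List (List Int)), Dom_state_edge state → Pre_state_edge state → Spec_state_edge state (state_edge state)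

-- ===== LEMMAS AND PROOFS =====

-- generic getD/set helper
theorem pv_getD_set {α : Type} (l : List α) (i j : Nat) (a d : α) :
    (l.set i a).getD j d = if i = j ∧ i < l.length then a else l.getD j d := by
  simp only [List.getD_eq_getElem?_getD, List.getElem?_set]
  split_ifs with h1 h2 h3 <;> simp_all <;> omega

theorem pv_get2_set2 (g : List (List Int)) (i j : Nat) (v : Int) (i' j' : Nat)
    (hi : i < g.length) (hj : j < (g.getD i []).length) :
    pvGet2 (pvSet2 g i j v) i' j' = if i = i' ∧ j = j' then v else pvGet2 g i' j' := by
  unfold pvGet2 pvSet2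
  rw [pv_getD_set]
  by_cases hii : i = i'
  · subst hii
    rw [if_pos ⟨rfl, hi⟩, pv_getD_set]
    by_cases hjj : j = j'
    · subst hjj
      rw [if_pos ⟨rfl, hj⟩, if_pos ⟨rfl, rfl⟩]
    · rw [if_neg (by tauto), if_neg (by tauto)]
  · rw [if_neg (by tauto), if_neg (by tauto)]

def pvShape (g : List (List Int)) : List Nat := g.map List.length

theorem pv_shape_len {g h : List (List Int)} (hs : pvShape g = pvShape h) : g.length = h.length := by
  have := congrArg List.length hs
  simpa [pvShape] using this

theorem pv_shape_row {g h : List (List Int)} (hs : pvShape g = pvShape h) (i : Nat) :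
    (g.getD i []).length = (h.getD i []).length := by
  have hlen : g.length = h.length := pv_shape_len hs
  by_cases hi : i < g.length
  · have h1 : (pvShape g).getD i 0 = (pvShape h).getD i 0 := by rw [hs]
    have e1 : (pvShape g).getD i 0 = (g.getD i []).length := by
      simp [pvShape, List.getD_eq_getElem?_getD, List.getElem?_map, hi, List.getElem?_eq_getElem]
    have e2 : (pvShape h).getD i 0 = (h.getD i []).length := by
      have hi' : i < h.length := hlen ▸ hi
      simp [pvShape, List.getD_eq_getElem?_getD, List.getElem?_map, hi', List.getElem?_eq_getElem]
    rw [e1] at h1; rw [e2] at h1; exact h1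
  · have hi' : ¬ i < h.length := by omega
    simp [List.getD_eq_getElem?_getD, List.getElem?_eq_none_iff.mpr (by omega : g.length ≤ i),
      List.getElem?_eq_none_iff.mpr (by omega : h.length ≤ i)]

theorem pv_shape_set2 (g : List (List Int)) (i j : Nat) (v : Int) :
    pvShape (pvSet2 g i j v) = pvShape g := by
  unfold pvShape pvSet2
  rw [List.map_set]
  apply List.ext_getElem
  · simp
  · intro t h1 h2
    rw [List.getElem_set]
    split_ifs with ht
    · subst ht
      have hi : i < g.length := by simpa using h2
      simp [List.getD_eq_getElem?_getD, List.getElem?_eq_getElem hi]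
    · rfl

theorem pv_grid_ext {g h : List (List Int)} (hs : pvShape g = pvShape h)
    (hv : ∀ i j, i < g.length → j < (g.getD i []).length → pvGet2 g i j = pvGet2 h i j) :
    g = h := by
  have hlen : g.length = h.length := pv_shape_len hs
  apply List.ext_getElem hlen
  intro i h1 h2
  apply List.ext_getElem
  · have := pv_shape_row hs i
    simpa [List.getD_eq_getElem?_getD, List.getElem?_eq_getElem, h1, h2] using this
  · intro j hj1 hj2
    have hgd : g.getD i [] = g[i] := by simp [List.getD_eq_getElem?_getD, List.getElem?_eq_getElem h1]
    have hhd : h.getD i [] = h[i] := by simp [List.getD_eq_getElem?_getD, List.getElem?_eq_getElem h2]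
    have := hv i j h1 (by rw [hgd]; exact hj1)
    unfold pvGet2 at this
    rw [hgd, hhd] at this
    simpa [List.getD_eq_getElem?_getD, List.getElem?_eq_getElem, hj1, hj2] using this

-- ----- characterization of the horizontal pass -----
abbrev pvRowW (r : List Int) (j : Nat) : Prop := pvGetI r j ≠ 0 ∧ pvGetI r j ≠ 1
abbrev pvRowH (r : List Int) (j : Nat) : Prop :=
  (0 < j ∧ pvRowW r (j-1)) ∨ (j + 1 < r.length ∧ pvRowW r (j+1))
def pvRowT (r : List Int) (j : Nat) : Int :=
  if pvGetI r j = 0 ∧ pvRowH r j then 1 else pvGetI r j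

theorem pv_hpass_aux (r : List Int) : ∀ k, k ≤ r.length →
    ((List.range k).foldl pvHStep r).length = r.length ∧
    ∀ j, ((List.range k).foldl pvHStep r).getD j 0 =
      if j < k then pvRowT r j else r.getD j 0 := by
  intro k
  induction k with
  | zero => intro _; exact ⟨rfl, by intro j; simp⟩
  | succ k ih =>
    intro hk
    obtain ⟨ihlen, ihval⟩ := ih (by omega)
    have hkr : k < r.length := by omega
    rw [List.range_succ, List.foldl_append, List.foldl_cons, List.foldl_nil]
    set r' : List Int := (List.range k).foldl pvHStep r with hr'
    have getk : r'.getD k 0 = r.getD k 0 := by rw [ihval k]; simp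
    have getk1 : r'.getD (k+1) 0 = r.getD (k+1) 0 := by rw [ihval (k+1)]; simp
    have getkm : 0 < k → r'.getD (k-1) 0 = pvRowT r (k-1) := by
      intro h; rw [ihval (k-1)]; simp [Nat.sub_lt h]
    have wallT : ∀ m, (pvRowT r m ≠ 0 ∧ pvRowT r m ≠ 1) ↔ pvRowW r m := by
      intro m
      unfold pvRowT pvRowW
      split_ifs with h
      · constructor
        · rintro ⟨_, h2⟩; exact absurd rfl h2
        · rintro ⟨h0, _⟩; exact absurd h.1 h0
      · exact Iff.rfl
    have hC1 : (0 < k ∧ pvGetI r' k = 0 ∧ pvGetI r' (k-1) ≠ 0 ∧ pvGetI r' (k-1) ≠ 1)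
        ↔ (0 < k ∧ r.getD k 0 = 0 ∧ pvRowW r (k-1)) := by
      unfold pvGetI
      constructor
      · rintro ⟨hp, h0, hw1, hw2⟩
        rw [getkm hp] at hw1 hw2
        exact ⟨hp, getk ▸ h0, (wallT (k-1)).mp ⟨hw1, hw2⟩⟩
      · rintro ⟨hp, h0, hw⟩
        have := (wallT (k-1)).mpr hw
        rw [← getkm hp] at this
        exact ⟨hp, getk ▸ h0, this.1, this.2⟩
    by_cases hc1 : 0 < k ∧ r.getD k 0 = 0 ∧ pvRowW r (k-1)
    · -- first `if` of the body fires
      have h1 : pvHStep1 r' k = r'.set k 1 := by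
        unfold pvHStep1; rw [if_pos (hC1.mpr hc1)]
      have hset : ∀ j, (r'.set k 1).getD j 0 = if k = j then 1 else r'.getD j 0 := by
        intro j
        rw [pv_getD_set]
        have hkl : k < r'.length := by omega
        by_cases hkj : k = j
        · rw [if_pos ⟨hkj, hkl⟩, if_pos hkj]
        · rw [if_neg (by tauto), if_neg hkj]
      have h2 : pvHStep r' k = r'.set k 1 := by
        unfold pvHStep
        rw [h1]
        have hne : ¬ (k + 1 < (r'.set k 1).length ∧ pvGetI (r'.set k 1) k = 0 ∧
            pvGetI (r'.set k 1) (k+1) ≠ 0 ∧ pvGetI (r'.set k 1) (k+1) ≠ 1) := by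
          rintro ⟨_, hz, _, _⟩
          unfold pvGetI at hz
          rw [hset k, if_pos rfl] at hz
          omega
        rw [if_neg hne]
      rw [h2]
      refine ⟨by rw [List.length_set, ihlen], ?_⟩
      intro j
      rw [hset j]
      by_cases hkj : k = j
      · subst hkj
        rw [if_pos rfl, if_pos (by omega)]
        unfold pvRowT
        rw [if_pos ⟨hc1.2.1, Or.inl ⟨hc1.1, hc1.2.2⟩⟩]
      · rw [if_neg hkj, ihval j]
        by_cases hjk : j < k
        · rw [if_pos hjk, if_pos (by omega)]
        · rw [if_neg hjk, if_neg (by omega)]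
    · -- first `if` does not fire
      have h1 : pvHStep1 r' k = r' := by
        unfold pvHStep1; rw [if_neg (fun h => hc1 (hC1.mp h))]
      have hC2 : (k + 1 < r'.length ∧ pvGetI r' k = 0 ∧ pvGetI r' (k+1) ≠ 0 ∧ pvGetI r' (k+1) ≠ 1)
          ↔ (k + 1 < r.length ∧ r.getD k 0 = 0 ∧ pvRowW r (k+1)) := by
        unfold pvGetI pvRowW
        rw [ihlen, getk, getk1]
        exact Iff.rfl
      by_cases hc2 : k + 1 < r.length ∧ r.getD k 0 = 0 ∧ pvRowW r (k+1)
      · have h2 : pvHStep r' k = r'.set k 1 := by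
          unfold pvHStep
          rw [h1, if_pos (hC2.mpr hc2)]
        rw [h2]
        refine ⟨by rw [List.length_set, ihlen], ?_⟩
        intro j
        rw [pv_getD_set]
        by_cases hkj : k = j
        · subst hkj
          rw [if_pos ⟨rfl, by omega⟩, if_pos (by omega)]
          unfold pvRowT
          rw [if_pos ⟨hc2.2.1, Or.inr ⟨hc2.1, hc2.2.2⟩⟩]
        · rw [if_neg (by tauto), ihval j]
          by_cases hjk : j < k
          · rw [if_pos hjk, if_pos (by omega)]
          · rw [if_neg hjk, if_neg (by omega)]
      · have h2 : pvHStep r' k = r' := by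
          unfold pvHStep
          rw [h1, if_neg (fun h => hc2 (hC2.mp h))]
        rw [h2]
        refine ⟨ihlen, ?_⟩
        intro j
        rw [ihval j]
        by_cases hkj : j = k
        · rw [if_neg (by omega), if_pos (by omega), hkj]
          unfold pvRowT
          have hneg : ¬ (pvGetI r k = 0 ∧ pvRowH r k) := by
            rintro ⟨hz, hH | hH⟩
            · exact hc1 ⟨hH.1, hz, hH.2⟩
            · exact hc2 ⟨hH.1, hz, hH.2⟩
          rw [if_neg hneg]
          rfl
        · by_cases hjk : j < k
          · rw [if_pos hjk, if_pos (by omega)]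
          · rw [if_neg hjk, if_neg (by omega)]

theorem pv_hpass_getD (r : List Int) (j : Nat) :
    (pvHPass r).getD j 0 = if j < r.length then pvRowT r j else r.getD j 0 :=
  (pv_hpass_aux r r.length le_rfl).2 j

theorem pv_hpass_len (r : List Int) : (pvHPass r).length = r.length :=
  (pv_hpass_aux r r.length le_rfl).1

-- ----- characterization of the vertical pass -----
abbrev pvColW (g : List (List Int)) (i j : Nat) : Prop := pvGet2 g i j ≠ 0 ∧ pvGet2 g i j ≠ 1
abbrev pvColV (g : List (List Int)) (i j : Nat) : Prop :=
  (0 < i ∧ pvColW g (i-1) j) ∨ (i + 1 < g.length ∧ pvColW g (i+1) j)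
def pvColT (g : List (List Int)) (j i : Nat) : Int :=
  if pvGet2 g i j = 0 ∧ pvColV g i j then 1 else pvGet2 g i j

theorem pv_vcol_aux (g : List (List Int)) (j : Nat)
    (hj : ∀ i, i < g.length → j < (g.getD i []).length) :
    ∀ k, k ≤ g.length →
    pvShape ((List.range k).foldl (fun h' i => pvVStep h' j i) g) = pvShape g ∧
    ∀ i' j', pvGet2 ((List.range k).foldl (fun h' i => pvVStep h' j i) g) i' j' =
      if j' = j ∧ i' < k then pvColT g j i' else pvGet2 g i' j' := by
  intro k
  induction k with
  | zero => intro _; exact ⟨rfl, by intro i' j'; simp⟩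
  | succ k ih =>
    intro hk
    obtain ⟨ihsh, ihval⟩ := ih (by omega)
    have hkg : k < g.length := by omega
    rw [List.range_succ, List.foldl_append, List.foldl_cons, List.foldl_nil]
    set h : List (List Int) := (List.range k).foldl (fun h' i => pvVStep h' j i) g with hh
    have hlen : h.length = g.length := pv_shape_len ihsh
    have hrow : ∀ i', (h.getD i' []).length = (g.getD i' []).length := pv_shape_row ihsh
    have hin : j < (h.getD k []).length := by rw [hrow k]; exact hj k hkg
    have getk : pvGet2 h k j = pvGet2 g k j := by rw [ihval k j]; simp
    have getk1 : pvGet2 h (k+1) j = pvGet2 g (k+1) j := by rw [ihval (k+1) j]; simp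
    have getkm : 0 < k → pvGet2 h (k-1) j = pvColT g j (k-1) := by
      intro hp; rw [ihval (k-1) j]; simp [Nat.sub_lt hp]
    have wallT : ∀ m, (pvColT g j m ≠ 0 ∧ pvColT g j m ≠ 1) ↔ pvColW g m j := by
      intro m
      unfold pvColT pvColW
      split_ifs with hx
      · constructor
        · rintro ⟨_, h2⟩; exact absurd rfl h2
        · rintro ⟨h0, _⟩; exact absurd hx.1 h0
      · exact Iff.rfl
    have hC1 : (0 < k ∧ pvGet2 h k j = 0 ∧ pvGet2 h (k-1) j ≠ 0 ∧ pvGet2 h (k-1) j ≠ 1)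
        ↔ (0 < k ∧ pvGet2 g k j = 0 ∧ pvColW g (k-1) j) := by
      constructor
      · rintro ⟨hp, h0, hw1, hw2⟩
        rw [getkm hp] at hw1 hw2
        exact ⟨hp, getk ▸ h0, (wallT (k-1)).mp ⟨hw1, hw2⟩⟩
      · rintro ⟨hp, h0, hw⟩
        have := (wallT (k-1)).mpr hw
        rw [← getkm hp] at this
        exact ⟨hp, getk ▸ h0, this.1, this.2⟩
    have hset : ∀ i' j', pvGet2 (pvSet2 h k j 1) i' j' =
        if k = i' ∧ j = j' then 1 else pvGet2 h i' j' :=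
      fun i' j' => pv_get2_set2 h k j 1 i' j' (by omega) hin
    have hsetsh : pvShape (pvSet2 h k j 1) = pvShape g := by
      rw [pv_shape_set2]; exact ihsh
    by_cases hc1 : 0 < k ∧ pvGet2 g k j = 0 ∧ pvColW g (k-1) j
    · have h1 : pvVStep1 h j k = pvSet2 h k j 1 := by
        unfold pvVStep1; rw [if_pos (hC1.mpr hc1)]
      have h2 : pvVStep h j k = pvSet2 h k j 1 := by
        unfold pvVStep
        rw [h1]
        have hne : ¬ (k + 1 < (pvSet2 h k j 1).length ∧ pvGet2 (pvSet2 h k j 1) k j = 0 ∧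
            pvGet2 (pvSet2 h k j 1) (k+1) j ≠ 0 ∧ pvGet2 (pvSet2 h k j 1) (k+1) j ≠ 1) := by
          rintro ⟨_, hz, _, _⟩
          rw [hset k j, if_pos ⟨rfl, rfl⟩] at hz
          omega
        rw [if_neg hne]
      rw [h2]
      refine ⟨hsetsh, ?_⟩
      intro i' j'
      rw [hset i' j']
      by_cases hkj : k = i' ∧ j = j'
      · rw [if_pos hkj, if_pos ⟨hkj.2.symm, by omega⟩, ← hkj.1]
        unfold pvColT
        rw [if_pos ⟨hc1.2.1, Or.inl ⟨hc1.1, hc1.2.2⟩⟩]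
      · rw [if_neg hkj, ihval i' j']
        by_cases hjj : j' = j ∧ i' < k
        · rw [if_pos hjj, if_pos ⟨hjj.1, by omega⟩]
        · rw [if_neg hjj, if_neg ?_]
          rintro ⟨he, hl⟩
          have hik : i' = k ∨ i' < k := by omega
          rcases hik with hik | hik
          · exact hkj ⟨hik.symm, he.symm⟩
          · exact hjj ⟨he, hik⟩
    · have h1 : pvVStep1 h j k = h := by
        unfold pvVStep1; rw [if_neg (fun hx => hc1 (hC1.mp hx))]
      have hC2 : (k + 1 < h.length ∧ pvGet2 h k j = 0 ∧
            pvGet2 h (k+1) j ≠ 0 ∧ pvGet2 h (k+1) j ≠ 1)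
          ↔ (k + 1 < g.length ∧ pvGet2 g k j = 0 ∧ pvColW g (k+1) j) := by
        unfold pvColW
        rw [hlen, getk, getk1]
      by_cases hc2 : k + 1 < g.length ∧ pvGet2 g k j = 0 ∧ pvColW g (k+1) j
      · have h2 : pvVStep h j k = pvSet2 h k j 1 := by
          unfold pvVStep
          rw [h1, if_pos (hC2.mpr hc2)]
        rw [h2]
        refine ⟨hsetsh, ?_⟩
        intro i' j'
        rw [hset i' j']
        by_cases hkj : k = i' ∧ j = j'
        · rw [if_pos hkj, if_pos ⟨hkj.2.symm, by omega⟩, ← hkj.1]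
          unfold pvColT
          rw [if_pos ⟨hc2.2.1, Or.inr ⟨hc2.1, hc2.2.2⟩⟩]
        · rw [if_neg hkj, ihval i' j']
          by_cases hjj : j' = j ∧ i' < k
          · rw [if_pos hjj, if_pos ⟨hjj.1, by omega⟩]
          · rw [if_neg hjj, if_neg ?_]
            rintro ⟨he, hl⟩
            have hik : i' = k ∨ i' < k := by omega
            rcases hik with hik | hik
            · exact hkj ⟨hik.symm, he.symm⟩
            · exact hjj ⟨he, hik⟩
      · have h2 : pvVStep h j k = h := by
          unfold pvVStep
          rw [h1, if_neg (fun hx => hc2 (hC2.mp hx))]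
        rw [h2]
        refine ⟨ihsh, ?_⟩
        intro i' j'
        rw [ihval i' j']
        by_cases hjj : j' = j ∧ i' < k
        · rw [if_pos hjj, if_pos ⟨hjj.1, by omega⟩]
        · by_cases hke : j' = j ∧ i' = k
          · rw [if_neg hjj, if_pos ⟨hke.1, by omega⟩, hke.1, hke.2]
            unfold pvColT
            have hneg : ¬ (pvGet2 g k j = 0 ∧ pvColV g k j) := by
              rintro ⟨hz, hH | hH⟩
              · exact hc1 ⟨hH.1, hz, hH.2⟩
              · exact hc2 ⟨hH.1, hz, hH.2⟩
            rw [if_neg hneg]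
          · rw [if_neg hjj, if_neg ?_]
            · rintro ⟨he, hl⟩
              have : i' = k ∨ i' < k := by omega
              rcases this with hik | hik
              · exact hke ⟨he, hik⟩
              · exact hjj ⟨he, hik⟩

theorem pv_colT_congr (h g : List (List Int)) (j i : Nat)
    (hl : h.length = g.length) (hcol : ∀ i', pvGet2 h i' j = pvGet2 g i' j) :
    pvColT h j i = pvColT g j i := by
  unfold pvColT pvColV pvColW
  rw [hl, hcol i, hcol (i-1), hcol (i+1)]

theorem pv_vpass_aux (g : List (List Int))
    (hrl : ∀ i, i < g.length → (g.headD []).length ≤ (g.getD i []).length) :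
    pvShape (pvVPass g) = pvShape g ∧
    ∀ i' j', pvGet2 (pvVPass g) i' j' =
      if j' < (g.headD []).length ∧ i' < g.length then pvColT g j' i' else pvGet2 g i' j' := by
  unfold pvVPass
  suffices hmain : ∀ k, k ≤ (g.headD []).length →
      pvShape ((List.range k).foldl
        (fun h j => (List.range h.length).foldl (fun h' i => pvVStep h' j i) h) g) = pvShape g ∧
      ∀ i' j', pvGet2 ((List.range k).foldl
        (fun h j => (List.range h.length).foldl (fun h' i => pvVStep h' j i) h) g) i' j' =
        if j' < k ∧ i' < g.length then pvColT g j' i' else pvGet2 g i' j' by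
    exact hmain _ le_rfl
  intro k
  induction k with
  | zero => intro _; exact ⟨rfl, by intro i' j'; simp⟩
  | succ k ih =>
    intro hk
    obtain ⟨ihsh, ihval⟩ := ih (by omega)
    rw [List.range_succ, List.foldl_append, List.foldl_cons, List.foldl_nil]
    set h : List (List Int) := (List.range k).foldl
      (fun h j => (List.range h.length).foldl (fun h' i => pvVStep h' j i) h) g with hh
    have hlen : h.length = g.length := pv_shape_len ihsh
    have hkcols : k < (g.headD []).length := by omega
    have hj' : ∀ i, i < h.length → k < (h.getD i []).length := by
      intro i hi
      rw [pv_shape_row ihsh i]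
      exact lt_of_lt_of_le hkcols (hrl i (by omega))
    obtain ⟨csh, cval⟩ := pv_vcol_aux h k hj' h.length le_rfl
    have hcolk : ∀ i'', pvGet2 h i'' k = pvGet2 g i'' k := by
      intro i''
      rw [ihval i'' k]
      simp
    constructor
    · rw [csh]; exact ihsh
    · intro i' j'
      rw [cval i' j']
      by_cases hjk : j' = k
      · subst hjk
        by_cases hik : i' < h.length
        · rw [if_pos ⟨rfl, hik⟩, if_pos ⟨by omega, by omega⟩]
          exact pv_colT_congr h g j' i' hlen hcolk
        · rw [if_neg (by tauto), ihval i' j', if_neg (by omega), if_neg (by omega)]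
      · rw [if_neg (by tauto), ihval i' j']
        by_cases hlt : j' < k ∧ i' < g.length
        · rw [if_pos hlt, if_pos ⟨by omega, hlt.2⟩]
        · rw [if_neg hlt, if_neg (by rintro ⟨ha, hb⟩; exact hlt ⟨by omega, hb⟩)]

-- ----- mark pass -----
theorem pv_shape_mark2 (g : List (List Int)) : pvShape (pvMark2 g) = pvShape g := by
  simp [pvShape, pvMark2, List.map_map, Function.comp_def]

theorem pv_get2_mark2 (g : List (List Int)) (i j : Nat) :
    pvGet2 (pvMark2 g) i j = if pvGet2 g i j = 1 then 2 else pvGet2 g i j := by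
  unfold pvGet2 pvMark2
  by_cases hi : i < g.length
  · have hgd : g.getD i [] = g[i] := by
      simp [List.getD_eq_getElem?_getD, List.getElem?_eq_getElem hi]
    have hmd : (g.map (fun r => r.map (fun v => if v = 1 then (2:Int) else v))).getD i []
        = (g[i]).map (fun v => if v = 1 then (2:Int) else v) := by
      simp [List.getD_eq_getElem?_getD, List.getElem?_eq_getElem hi]
    rw [hgd, hmd]
    by_cases hjr : j < (g[i]).length
    · simp [List.getD_eq_getElem?_getD, List.getElem?_eq_getElem hjr]
    · rw [List.getD_eq_getElem?_getD, List.getD_eq_getElem?_getD,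
        List.getElem?_eq_none_iff.mpr (by simpa using hjr),
        List.getElem?_eq_none_iff.mpr (by omega : (g[i]).length ≤ j)]
      simp
  · have h1 : g.getD i [] = ([] : List Int) := by
      simp [List.getD_eq_getElem?_getD, List.getElem?_eq_none_iff.mpr (by omega : g.length ≤ i)]
    have h2 : (g.map (fun r => r.map (fun v => if v = 1 then (2:Int) else v))).getD i [] = ([] : List Int) := by
      rw [List.getD_eq_getElem?_getD, List.getElem?_eq_none_iff.mpr (by simpa using (by omega : g.length ≤ i))]
      rfl
    rw [h1, h2]
    simp

theorem pv_mark2_ne_one (g : List (List Int)) (i j : Nat) : pvGet2 (pvMark2 g) i j ≠ 1 := by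
  rw [pv_get2_mark2]; split_ifs with h <;> omega

-- ----- final pass is the identity on 1-free grids -----
theorem pv_fstep_id {g : List (List Int)} (h1 : ∀ i j, pvGet2 g i j ≠ 1) (j i : Nat) :
    pvFStep g j i = g := by
  unfold pvFStep; rw [if_neg (h1 i j)]

theorem pv_ffold_inner {g : List (List Int)} (h1 : ∀ i j, pvGet2 g i j ≠ 1) (j : Nat) :
    ∀ l : List Nat, l.foldl (fun h' i => pvFStep h' j i) g = g := by
  intro l
  induction l with
  | nil => rfl
  | cons a t ih => simp only [List.foldl_cons, pv_fstep_id h1]; exact ih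

theorem pv_fpass_id {g : List (List Int)} (h1 : ∀ i j, pvGet2 g i j ≠ 1) : pvFPass g = g := by
  unfold pvFPass
  generalize (List.range (g.headD []).length) = l
  induction l with
  | nil => rfl
  | cons a t ih => simp only [List.foldl_cons, pv_ffold_inner h1]; exact ih

-- ----- B-side characterization -----
theorem pv_getD_row (s : List (List Int)) (i : Nat) (hi : i < s.length) :
    s.getD i [] = s[i] := by
  simp [List.getD_eq_getElem?_getD, List.getElem?_eq_getElem hi]

theorem pv_mem_zipIdxI (l : List Int) (v : Int) (j : Nat) :
    (v, j) ∈ l.zipIdx ↔ (j < l.length ∧ l.getD j 0 = v) := by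
  rw [List.mem_zipIdx_iff_getElem?]
  constructor
  · intro h
    have hj : j < l.length := by
      by_contra h0
      rw [List.getElem?_eq_none_iff.mpr (by omega)] at h
      cases h
    rw [List.getElem?_eq_getElem hj] at h
    have hv : l[j] = v := by injection h
    rw [List.getD_eq_getElem?_getD, List.getElem?_eq_getElem hj]
    exact ⟨hj, hv⟩
  · rintro ⟨hj, hv⟩
    rw [List.getElem?_eq_getElem hj]
    rw [List.getD_eq_getElem?_getD, List.getElem?_eq_getElem hj] at hv
    rw [show l[j] = v from hv]

theorem pv_edgeIdx_mem (line : List Int) (j : Nat) :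
    j ∈ pvEdgeIdx line ↔ (j < line.length ∧ line.getD j 0 = 0 ∧
      ((0 < j ∧ pvWall (line.getD (j-1) 0) = true) ∨
       (j + 1 < line.length ∧ pvWall (line.getD (j+1) 0) = true))) := by
  unfold pvEdgeIdx
  rw [List.mem_filterMap]
  constructor
  · rintro ⟨⟨v, j'⟩, hmem, hif⟩
    dsimp only at hif
    split_ifs at hif with hc
    · have hjj : j' = j := Option.some.inj hif
      subst hjj
      obtain ⟨hj', hv⟩ := (pv_mem_zipIdxI line v j').mp hmem
      refine ⟨hj', by rw [hv]; exact hc.1, hc.2⟩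
  · rintro ⟨hj, hz, hH⟩
    refine ⟨(line.getD j 0, j), (pv_mem_zipIdxI line _ j).mpr ⟨hj, rfl⟩, ?_⟩
    dsimp only
    rw [if_pos ⟨hz, hH⟩]

theorem pv_min_elim (L : List Nat) (a : Nat) (h : ∀ x ∈ L, a ≤ x) :
    L.min?.elim a (min a) = a := by
  cases hL : L.min? with
  | none => rfl
  | some b =>
    have hb : b ∈ L := List.min?_mem hL
    simpa using Nat.min_eq_left (h b hb)

theorem pv_cols_eq (s : List (List Int)) (hne : s ≠ [])
    (hrl : ∀ r ∈ s, (s.headD []).length ≤ r.length) :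
    pvCols s = (s.headD []).length := by
  unfold pvCols
  cases s with
  | nil => exact absurd rfl hne
  | cons a t =>
    rw [List.map_cons, List.min?_cons]
    have : (t.map List.length).min?.elim a.length (min a.length) = a.length := by
      apply pv_min_elim
      intro x hx
      obtain ⟨r, hr, hxl⟩ := List.mem_map.mp hx
      have := hrl r (by simp [hr])
      simpa [← hxl] using this
    rw [this]
    rfl

theorem pv_zipT_len (g : List (List Int)) : (pvZipT g).length = pvCols g := by
  simp [pvZipT]

theorem pv_zipT_getD (g : List (List Int)) (j : Nat) (hj : j < pvCols g) :
    (pvZipT g).getD j [] = g.map (fun r => r.getD j 0) := by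
  unfold pvZipT
  rw [List.getD_eq_getElem?_getD, List.getElem?_map, List.getElem?_range hj]
  rfl

theorem pv_colget (g : List (List Int)) (i j : Nat) :
    (g.map fun r => r.getD j 0).getD i 0 = pvGet2 g i j := by
  by_cases hi : i < g.length
  · unfold pvGet2
    rw [pv_getD_row g i hi]
    simp [List.getD_eq_getElem?_getD, List.getElem?_map, List.getElem?_eq_getElem hi]
  · unfold pvGet2
    rw [List.getD_eq_getElem?_getD, List.getElem?_eq_none_iff.mpr (by simpa using (by omega : g.length ≤ i)),
      List.getD_eq_getElem?_getD (l := g), List.getElem?_eq_none_iff.mpr (by omega : g.length ≤ i)]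
    rfl

theorem pv_shape_alt (s : List (List Int)) : pvShape (state_edge_alt s) = pvShape s := by
  unfold pvShape state_edge_alt
  apply List.ext_getElem
  · simp
  · intro i h1 h2
    simp [List.getElem_mapIdx]

theorem pv_alt_get (s : List (List Int)) (hne : s ≠ [])
    (hrl : ∀ r ∈ s, (s.headD []).length ≤ r.length) (i j : Nat)
    (hi : i < s.length) (hj : j < (s.getD i []).length) :
    pvGet2 (state_edge_alt s) i j =
      (if pvGet2 s i j = 1 then 2
       else if pvGet2 s i j = 0 ∧
          (((0 < j ∧ pvWall (pvGetI (s.getD i []) (j-1)) = true) ∨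
            (j + 1 < (s.getD i []).length ∧ pvWall (pvGetI (s.getD i []) (j+1)) = true)) ∨
           (j < (s.headD []).length ∧
            ((0 < i ∧ pvWall (pvGet2 s (i-1) j) = true) ∨
             (i + 1 < s.length ∧ pvWall (pvGet2 s (i+1) j) = true)))) then 2
       else pvGet2 s i j) := by
  have hgd : s.getD i [] = s[i] := pv_getD_row s i hi
  have hj' : j < (s[i]).length := hgd ▸ hj
  -- the value written by B at (i, j)
  have hrowB : (state_edge_alt s).getD i [] = (s[i]).mapIdx (fun j v =>
      if v = 1 ∨ ((s.map pvEdgeIdx).getD i []).contains j = true ∨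
          (j < ((pvZipT s).map pvEdgeIdx).length ∧
            (((pvZipT s).map pvEdgeIdx).getD j []).contains i = true) then 2 else v) := by
    unfold state_edge_alt
    simp [List.getD_eq_getElem?_getD, List.getElem?_mapIdx, List.getElem?_eq_getElem hi]
  have hcell : pvGet2 (state_edge_alt s) i j =
      (if s[i][j] = 1 ∨ ((s.map pvEdgeIdx).getD i []).contains j = true ∨
          (j < ((pvZipT s).map pvEdgeIdx).length ∧
            (((pvZipT s).map pvEdgeIdx).getD j []).contains i = true) then 2 else s[i][j]) := by
    unfold pvGet2
    rw [hrowB, List.getD_eq_getElem?_getD, List.getElem?_mapIdx, List.getElem?_eq_getElem hj']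
    simp only [Option.map_some, Option.getD_some]
  have hv : s[i][j] = pvGet2 s i j := by
    unfold pvGet2
    rw [hgd]
    simp [List.getD_eq_getElem?_getD, List.getElem?_eq_getElem hj']
  have hrm : ((s.map pvEdgeIdx).getD i []) = pvEdgeIdx (s.getD i []) := by
    rw [List.getD_eq_getElem?_getD, List.getElem?_map, List.getElem?_eq_getElem hi, hgd]
    rfl
  have hcols : ((pvZipT s).map pvEdgeIdx).length = (s.headD []).length := by
    rw [List.length_map, pv_zipT_len, pv_cols_eq s hne hrl]
  -- row-marks membership
  have hCrow : (((s.map pvEdgeIdx).getD i []).contains j = true) ↔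
      (pvGet2 s i j = 0 ∧
        ((0 < j ∧ pvWall (pvGetI (s.getD i []) (j-1)) = true) ∨
         (j + 1 < (s.getD i []).length ∧ pvWall (pvGetI (s.getD i []) (j+1)) = true))) := by
    rw [hrm, List.contains_iff_mem, pv_edgeIdx_mem]
    unfold pvGetI pvGet2
    constructor
    · rintro ⟨_, hz, hH⟩; exact ⟨hz, hH⟩
    · rintro ⟨hz, hH⟩; exact ⟨hj, hz, hH⟩
  -- column-marks membership (for j < cols)
  have hCcol : ∀ (hjc : j < (s.headD []).length),
      ((((pvZipT s).map pvEdgeIdx).getD j []).contains i = true) ↔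
      (pvGet2 s i j = 0 ∧
        ((0 < i ∧ pvWall (pvGet2 s (i-1) j) = true) ∨
         (i + 1 < s.length ∧ pvWall (pvGet2 s (i+1) j) = true))) := by
    intro hjc
    have hjc' : j < pvCols s := by rw [pv_cols_eq s hne hrl]; exact hjc
    have hmd : ((pvZipT s).map pvEdgeIdx).getD j [] =
        pvEdgeIdx (s.map fun r => r.getD j 0) := by
      have hjz : j < (pvZipT s).length := by rw [pv_zipT_len]; exact hjc'
      rw [List.getD_eq_getElem?_getD, List.getElem?_map, List.getElem?_eq_getElem hjz]
      have := pv_zipT_getD s j hjc'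
      rw [pv_getD_row _ j hjz] at this
      rw [this]
      rfl
    rw [hmd, List.contains_iff_mem, pv_edgeIdx_mem]
    rw [List.length_map, pv_colget s i j, pv_colget s (i-1) j, pv_colget s (i+1) j]
    constructor
    · rintro ⟨_, hz, hH⟩; exact ⟨hz, hH⟩
    · rintro ⟨hz, hH⟩; exact ⟨by simpa using hi, hz, hH⟩
  rw [hcell, hv, hcols]
  by_cases hv1 : pvGet2 s i j = 1
  · rw [if_pos (Or.inl hv1), if_pos hv1]
  · rw [if_neg hv1]
    by_cases hP : pvGet2 s i j = 0 ∧
        (((0 < j ∧ pvWall (pvGetI (s.getD i []) (j-1)) = true) ∨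
          (j + 1 < (s.getD i []).length ∧ pvWall (pvGetI (s.getD i []) (j+1)) = true)) ∨
         (j < (s.headD []).length ∧
          ((0 < i ∧ pvWall (pvGet2 s (i-1) j) = true) ∨
           (i + 1 < s.length ∧ pvWall (pvGet2 s (i+1) j) = true))))
    · rw [if_pos hP]
      obtain ⟨hz, hH | ⟨hjc, hV⟩⟩ := hP
      · rw [if_pos (Or.inr (Or.inl (hCrow.mpr ⟨hz, hH⟩)))]
      · rw [if_pos (Or.inr (Or.inr ⟨hjc, (hCcol hjc).mpr ⟨hz, hV⟩⟩))]
    · rw [if_neg hP, if_neg ?_]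
      rintro (h1 | h2 | ⟨hjc, h3⟩)
      · exact hv1 h1
      · obtain ⟨hz, hH⟩ := hCrow.mp h2
        exact hP ⟨hz, Or.inl hH⟩
      · obtain ⟨hz, hV⟩ := (hCcol hjc).mp h3
        exact hP ⟨hz, Or.inr ⟨hjc, hV⟩⟩

-- ----- assembly -----
theorem pv_rowT_wall (r : List Int) (m : Nat) :
    (pvRowT r m ≠ 0 ∧ pvRowT r m ≠ 1) ↔ pvRowW r m := by
  unfold pvRowT pvRowW
  split_ifs with h
  · constructor
    · rintro ⟨_, h2⟩; exact absurd rfl h2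
    · rintro ⟨h0, _⟩; exact absurd h.1 h0
  · exact Iff.rfl

theorem pv_wall_iff (x : Int) : pvWall x = true ↔ (x ≠ 0 ∧ x ≠ 1) := by
  simp [pvWall]

theorem pv_main (s : List (List Int)) (hpre : Pre_state_edge s) :
    state_edge s = state_edge_alt s := by
  obtain ⟨hne, hall⟩ := hpre
  have hrl : ∀ i, i < s.length → (s.headD []).length ≤ (s.getD i []).length := by
    intro i hi
    refine hall _ ?_
    rw [List.getD_eq_getElem?_getD, List.getElem?_eq_getElem hi]
    exact List.getElem_mem hi
  have g1sh : pvShape (s.map pvHPass) = pvShape s := by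
    unfold pvShape
    rw [List.map_map]
    apply List.ext_getElem
    · simp
    · intro t h1 h2
      simp [pv_hpass_len]
  have g1len : (s.map pvHPass).length = s.length := pv_shape_len g1sh
  have g1head : ((s.map pvHPass).headD []).length = (s.headD []).length := by
    cases s with
    | nil => rfl
    | cons a t => simp [pv_hpass_len]
  have g1get : ∀ i j', pvGet2 (s.map pvHPass) i j' =
      if j' < (s.getD i []).length then pvRowT (s.getD i []) j' else pvGet2 s i j' := by
    intro i j'
    by_cases hi : i < s.length
    · have hmd : (s.map pvHPass).getD i [] = pvHPass (s.getD i []) := by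
        rw [List.getD_eq_getElem?_getD, List.getElem?_map, List.getElem?_eq_getElem hi]
        simp [List.getD_eq_getElem?_getD, List.getElem?_eq_getElem hi]
      unfold pvGet2
      rw [hmd, pv_hpass_getD]
    · have h1 : (s.map pvHPass).getD i [] = ([] : List Int) := by
        rw [List.getD_eq_getElem?_getD, List.getElem?_eq_none_iff.mpr (by simpa using (by omega : s.length ≤ i))]
        rfl
      have h2 : s.getD i [] = ([] : List Int) := by
        rw [List.getD_eq_getElem?_getD, List.getElem?_eq_none_iff.mpr (by omega : s.length ≤ i)]
        rfl
      unfold pvGet2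
      rw [h1, h2]
      simp
  have hrl1 : ∀ i, i < (s.map pvHPass).length →
      ((s.map pvHPass).headD []).length ≤ ((s.map pvHPass).getD i []).length := by
    intro i hi
    rw [g1head, pv_shape_row g1sh i]
    exact hrl i (by omega)
  obtain ⟨vsh, vval⟩ := pv_vpass_aux (s.map pvHPass) hrl1
  have hfp : state_edge s = pvMark2 (pvVPass (s.map pvHPass)) := by
    unfold state_edge
    exact pv_fpass_id (pv_mark2_ne_one _)
  rw [hfp]
  have sh3 : pvShape (pvMark2 (pvVPass (s.map pvHPass))) = pvShape s := by
    rw [pv_shape_mark2, vsh, g1sh]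
  apply pv_grid_ext
  · rw [sh3, pv_shape_alt]
  · intro i j hi hj
    have hsl : i < s.length := by rw [← pv_shape_len sh3]; exact hi
    have hjr : j < (s.getD i []).length := by rw [← pv_shape_row sh3 i]; exact hj
    rw [pv_alt_get s hne hall i j hsl hjr, pv_get2_mark2, vval i j, g1head, g1len]
    have ht1 : pvGet2 (s.map pvHPass) i j = pvRowT (s.getD i []) j := by
      rw [g1get i j, if_pos hjr]
    have hHB : ((0 < j ∧ pvWall (pvGetI (s.getD i []) (j-1)) = true) ∨
        (j + 1 < (s.getD i []).length ∧ pvWall (pvGetI (s.getD i []) (j+1)) = true)) ↔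
        pvRowH (s.getD i []) j := by
      unfold pvRowH pvRowW
      rw [pv_wall_iff, pv_wall_iff]
    by_cases hcj : j < (s.headD []).length
    · rw [if_pos (show j < (s.headD []).length ∧ i < s.length from ⟨hcj, hsl⟩)]
      have hV : pvColV (s.map pvHPass) i j ↔
          ((0 < i ∧ (pvGet2 s (i-1) j ≠ 0 ∧ pvGet2 s (i-1) j ≠ 1)) ∨
           (i + 1 < s.length ∧ (pvGet2 s (i+1) j ≠ 0 ∧ pvGet2 s (i+1) j ≠ 1))) := by
        unfold pvColV pvColW
        rw [g1len]
        constructor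
        · rintro (⟨hp, hw⟩ | ⟨hp, hw⟩)
          · left
            refine ⟨hp, ?_⟩
            rw [g1get (i-1) j, if_pos (lt_of_lt_of_le hcj (hrl (i-1) (by omega)))] at hw
            exact (pv_rowT_wall _ _).mp hw
          · right
            refine ⟨hp, ?_⟩
            rw [g1get (i+1) j, if_pos (lt_of_lt_of_le hcj (hrl (i+1) (by omega)))] at hw
            exact (pv_rowT_wall _ _).mp hw
        · rintro (⟨hp, hw⟩ | ⟨hp, hw⟩)
          · left
            refine ⟨hp, ?_⟩
            rw [g1get (i-1) j, if_pos (lt_of_lt_of_le hcj (hrl (i-1) (by omega)))]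
            exact (pv_rowT_wall _ _).mpr hw
          · right
            refine ⟨hp, ?_⟩
            rw [g1get (i+1) j, if_pos (lt_of_lt_of_le hcj (hrl (i+1) (by omega)))]
            exact (pv_rowT_wall _ _).mpr hw
      have et1 : ∀ (hvH : ¬ (pvGet2 s i j = 0 ∧ pvRowH (s.getD i []) j)),
          pvRowT (s.getD i []) j = pvGet2 s i j := by
        intro hvH
        unfold pvRowT
        exact if_neg hvH
      by_cases hv1 : pvGet2 s i j = 1
      · have hvH : ¬ (pvGet2 s i j = 0 ∧ pvRowH (s.getD i []) j) := by
          rintro ⟨hz, _⟩; rw [hv1] at hz; omega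
        have ec : pvColT (List.map pvHPass s) j i = pvGet2 s i j := by
          unfold pvColT
          rw [ht1, et1 hvH]
          exact if_neg (by rintro ⟨hz, _⟩; rw [hv1] at hz; omega)
        rw [ec, if_pos hv1, if_pos hv1]
      · by_cases hv0 : pvGet2 s i j = 0
        · by_cases hH : pvRowH (s.getD i []) j
          · have ec : pvColT (List.map pvHPass s) j i = 1 := by
              unfold pvColT
              have e1 : pvRowT (s.getD i []) j = 1 := by
                unfold pvRowT; exact if_pos ⟨hv0, hH⟩
              rw [ht1, e1]
              exact if_neg (by rintro ⟨hz, _⟩; omega)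
            rw [ec, if_pos rfl, if_neg hv1, if_pos ⟨hv0, Or.inl (hHB.mpr hH)⟩]
          · have hvH : ¬ (pvGet2 s i j = 0 ∧ pvRowH (s.getD i []) j) := by
              rintro ⟨_, hx⟩; exact hH hx
            by_cases hVv : pvColV (List.map pvHPass s) i j
            · have ec : pvColT (List.map pvHPass s) j i = 1 := by
                unfold pvColT
                rw [ht1, et1 hvH]
                exact if_pos ⟨hv0, hVv⟩
              have hVB : (0 < i ∧ pvWall (pvGet2 s (i-1) j) = true) ∨
                  (i + 1 < s.length ∧ pvWall (pvGet2 s (i+1) j) = true) := by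
                rcases hV.mp hVv with ⟨hp, hw⟩ | ⟨hp, hw⟩
                · exact Or.inl ⟨hp, (pv_wall_iff _).mpr hw⟩
                · exact Or.inr ⟨hp, (pv_wall_iff _).mpr hw⟩
              rw [ec, if_pos rfl, if_neg hv1, if_pos ⟨hv0, Or.inr ⟨hcj, hVB⟩⟩]
            · have ec : pvColT (List.map pvHPass s) j i = pvGet2 s i j := by
                unfold pvColT
                rw [ht1, et1 hvH]
                exact if_neg (by rintro ⟨_, hx⟩; exact hVv hx)
              have hnB : ¬ (pvGet2 s i j = 0 ∧
                  (((0 < j ∧ pvWall (pvGetI (s.getD i []) (j-1)) = true) ∨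
                    (j + 1 < (s.getD i []).length ∧ pvWall (pvGetI (s.getD i []) (j+1)) = true)) ∨
                   (j < (s.headD []).length ∧
                    ((0 < i ∧ pvWall (pvGet2 s (i-1) j) = true) ∨
                     (i + 1 < s.length ∧ pvWall (pvGet2 s (i+1) j) = true))))) := by
                rintro ⟨_, hHV | ⟨_, hVV⟩⟩
                · exact hH (hHB.mp hHV)
                · refine hVv (hV.mpr ?_)
                  rcases hVV with ⟨hp, hw⟩ | ⟨hp, hw⟩
                  · exact Or.inl ⟨hp, (pv_wall_iff _).mp hw⟩
                  · exact Or.inr ⟨hp, (pv_wall_iff _).mp hw⟩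
              rw [ec, if_neg hv1, if_neg hv1, if_neg hnB]
        · have hvH : ¬ (pvGet2 s i j = 0 ∧ pvRowH (s.getD i []) j) := by
            rintro ⟨hz, _⟩; exact hv0 hz
          have ec : pvColT (List.map pvHPass s) j i = pvGet2 s i j := by
            unfold pvColT
            rw [ht1, et1 hvH]
            exact if_neg (by rintro ⟨hz, _⟩; exact hv0 hz)
          rw [ec, if_neg hv1, if_neg hv1,
            if_neg (show ¬ (pvGet2 s i j = 0 ∧ _) from by rintro ⟨hz, _⟩; exact hv0 hz)]
    · rw [if_neg (show ¬ (j < (s.headD []).length ∧ i < s.length) from by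
        rintro ⟨hx, _⟩; exact hcj hx), ht1]
      have et1 : ∀ (hvH : ¬ (pvGet2 s i j = 0 ∧ pvRowH (s.getD i []) j)),
          pvRowT (s.getD i []) j = pvGet2 s i j := by
        intro hvH
        unfold pvRowT
        exact if_neg hvH
      by_cases hv1 : pvGet2 s i j = 1
      · have hvH : ¬ (pvGet2 s i j = 0 ∧ pvRowH (s.getD i []) j) := by
          rintro ⟨hz, _⟩; rw [hv1] at hz; omega
        rw [et1 hvH, if_pos hv1, if_pos hv1]
      · by_cases hv0 : pvGet2 s i j = 0
        · by_cases hH : pvRowH (s.getD i []) j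
          · have e1 : pvRowT (s.getD i []) j = 1 := by
              unfold pvRowT; exact if_pos ⟨hv0, hH⟩
            rw [e1, if_pos rfl, if_neg hv1, if_pos ⟨hv0, Or.inl (hHB.mpr hH)⟩]
          · have hvH : ¬ (pvGet2 s i j = 0 ∧ pvRowH (s.getD i []) j) := by
              rintro ⟨_, hx⟩; exact hH hx
            have hnB : ¬ (pvGet2 s i j = 0 ∧
                (((0 < j ∧ pvWall (pvGetI (s.getD i []) (j-1)) = true) ∨
                  (j + 1 < (s.getD i []).length ∧ pvWall (pvGetI (s.getD i []) (j+1)) = true)) ∨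
                 (j < (s.headD []).length ∧
                  ((0 < i ∧ pvWall (pvGet2 s (i-1) j) = true) ∨
                   (i + 1 < s.length ∧ pvWall (pvGet2 s (i+1) j) = true))))) := by
              rintro ⟨_, hHV | ⟨hx, _⟩⟩
              · exact hH (hHB.mp hHV)
              · exact hcj hx
            rw [et1 hvH, if_neg hv1, if_neg hv1, if_neg hnB]
        · have hvH : ¬ (pvGet2 s i j = 0 ∧ pvRowH (s.getD i []) j) := by
            rintro ⟨hz, _⟩; exact hv0 hz
          rw [et1 hvH, if_neg hv1, if_neg hv1,
            if_neg (show ¬ (pvGet2 s i j = 0 ∧ _) from by rintro ⟨hz, _⟩; exact hv0 hz)]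

-- ===== VERDICT (by name: the statement is the Claim_ definition above) =====
theorem state_edge_spec : Claim_equal_state_edge := by
  intro s _ hpre
  unfold Spec_state_edge
  exact pv_main s hpre
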